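-- pv_equiv track=rewrite | github.com/diamondburned/cpsc-439 | justin/exercise-2-14.py | ntk
-- ===== SOURCE A (Python) =====
-- def ntk(n) -> list[int]:
--     s = str(n)
--     i, j = 0, 0
--     rebuild = []
--     while i <= j:
--         if j < len(s) and s[i] == s[j]:
--             j += 1
--             continue
--         delta = j - i
--         if s[i] in "56":
--             rebuild.append(0)
--             i = j
--             if j >= len(s):
--                 break
--             continue
--         rebuild.append(delta * -1 if s[i] in "34" else delta)
--         i = j
--         if j >= len(s):
--             break
--
--     return rebuild
-- ===== SOURCE B (Python) =====
-- def ntk(n) -> list[int]: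
--     def encode(s):
--         if not s:
--             return []
--         d = s[0]
--         run = len(s) - len(s.lstrip(d))
--         head = 0 if d in "56" else -run if d in "34" else run
--         return [head] + encode(s[run:])
--     return encode(str(n))
-- ===== Notes on version B (the rewrite author's own statement) =====
-- stated objective: simpler
-- what changed: Replaces A's interleaved two-pointer while-loop with break/continue by a short recursion over the digit string that measures each run with lstrip and conses the encoded value onto the encoding of the rest.
import Mathlib
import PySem

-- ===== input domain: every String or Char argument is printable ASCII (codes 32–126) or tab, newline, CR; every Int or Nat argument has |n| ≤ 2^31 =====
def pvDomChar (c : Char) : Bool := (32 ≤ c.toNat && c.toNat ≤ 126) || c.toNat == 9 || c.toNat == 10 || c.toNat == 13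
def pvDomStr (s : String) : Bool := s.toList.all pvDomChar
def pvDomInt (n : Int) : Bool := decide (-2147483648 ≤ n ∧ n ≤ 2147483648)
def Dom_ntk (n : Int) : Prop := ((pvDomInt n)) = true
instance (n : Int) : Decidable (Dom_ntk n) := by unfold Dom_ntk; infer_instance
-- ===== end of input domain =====

-- B re-implements A's two-pointer run-length loop as a short recursion over the digit
-- string (run length via lstrip); same return value for every int n.

-- ===== PORT A =====
-- A's while-loop over the two indices i ≤ j into s = str(n).  s[i] / s[j] are ported as
-- List.getD with a dummy default: exact here because str(n) is never empty, so every
-- access A performs is in range (the dummy ' ' is never read).  The fuel parameter only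
-- makes the loop total: 2*len(s)+1 iterations always suffice (proved below), so the
-- fuel-exhausted branch is never taken.
def ntkLoopF : Nat → List Char → Nat → Nat → List Int → List Int
  | 0, _, _, _, rebuild => rebuild
  | f + 1, cs, i, j, rebuild =>
    if i ≤ j then
      if j < cs.length ∧ cs.getD i ' ' = cs.getD j ' ' then
        ntkLoopF f cs i (j + 1) rebuild
      else if cs.getD i ' ' = '5' ∨ cs.getD i ' ' = '6' then
        if cs.length ≤ j then rebuild ++ [0]
        else ntkLoopF f cs j j (rebuild ++ [0])
      else
        let delta : Int := (j : Int) - (i : Int)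
        let r := rebuild ++ [if cs.getD i ' ' = '3' ∨ cs.getD i ' ' = '4' then delta * -1 else delta]
        if cs.length ≤ j then r else ntkLoopF f cs j j r
    else rebuild

def ntk (n : Int) : List Int :=
  ntkLoopF (2 * (PySem.Int.toStr n).toList.length + 1) (PySem.Int.toStr n).toList 0 0 []

-- ===== PORT B =====
-- B's recursive helper `encode`.  `len(s) - len(s.lstrip(d))` is ported by hand as
-- length minus the length of `dropWhile (· == d)`: exact, since d is a single character
-- and lstrip(d) removes exactly the leading characters equal to d.  `s[run:]` is drop.
-- The fuel parameter only makes the recursion structural: len(s) calls always suffice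
-- because every run has length ≥ 1 (proved below).
def ntkEncodeF : Nat → List Char → List Int
  | 0, _ => []
  | _ + 1, [] => []
  | f + 1, d :: t =>
    let run := (d :: t).length - ((d :: t).dropWhile (· == d)).length
    (if d = '5' ∨ d = '6' then 0
     else if d = '3' ∨ d = '4' then -(run : Int) else (run : Int)) ::
    ntkEncodeF f ((d :: t).drop run)

def ntkEncode (cs : List Char) : List Int := ntkEncodeF cs.length cs

def ntk_alt (n : Int) : List Int := ntkEncode (PySem.Int.toStr n).toList

-- ===== PRECONDITION & SPEC =====
def Spec_ntk (n : Int) (out : List Int) : Prop := out = ntk_alt n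
instance (n : Int) (out : List Int) : Decidable (Spec_ntk n out) := by unfold Spec_ntk; infer_instance

-- ===== CLAIM (what is proved, stated in full; the proofs are below) =====
def Claim_equal_ntk : Prop := ∀ (n : Int), Dom_ntk n → Spec_ntk n (ntk n)

-- ===== LEMMAS AND PROOFS =====

-- run length of the run starting at index i
def runLen (cs : List Char) (i : Nat) : Nat :=
  ((cs.drop i).takeWhile (· == cs.getD i ' ')).length

lemma runLen_le (cs : List Char) (i : Nat) : runLen cs i ≤ cs.length - i := by
  have h := (List.takeWhile_prefix (l := cs.drop i) (· == cs.getD i ' ')).length_le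
  simpa [runLen] using h

lemma drop_cons (cs : List Char) (i : Nat) (hi : i < cs.length) :
    cs.drop i = cs.getD i ' ' :: (cs.drop i).tail := by
  cases he : cs.drop i with
  | nil =>
    have hl : (cs.drop i).length = cs.length - i := List.length_drop
    rw [he] at hl; simp at hl; omega
  | cons c t =>
    have h0 : cs[i]? = some c := by
      have := List.getElem?_drop (xs := cs) (i := i) (j := 0)
      rw [he] at this; simpa using this.symm
    simp [List.getD_eq_getElem?_getD, h0]

lemma runLen_pos (cs : List Char) (i : Nat) (hi : i < cs.length) : 1 ≤ runLen cs i := by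
  unfold runLen
  rw [drop_cons cs i hi, List.takeWhile_cons_of_pos (by simp)]
  simp

lemma getD_of_lt_runLen (cs : List Char) (i m : Nat) (hm : m < runLen cs i) :
    cs.getD (i + m) ' ' = cs.getD i ' ' := by
  have hpre := List.takeWhile_prefix (l := cs.drop i) (· == cs.getD i ' ')
  have hmlt : m < ((cs.drop i).takeWhile (· == cs.getD i ' ')).length := hm
  have hmlt' : m < (cs.drop i).length := lt_of_lt_of_le hmlt hpre.length_le
  have hget : ((cs.drop i).takeWhile (· == cs.getD i ' '))[m] = (cs.drop i)[m] :=
    hpre.getElem hmlt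
  have hmem := List.getElem_mem hmlt
  have hpred := List.mem_takeWhile_imp hmem
  rw [hget] at hpred
  have heq : (cs.drop i)[m] = cs.getD i ' ' := by simpa using hpred
  have h1 : cs[i + m]? = some ((cs.drop i)[m]) := by
    rw [← List.getElem?_drop]; exact (List.getElem?_eq_getElem hmlt')
  simp [List.getD_eq_getElem?_getD, h1, heq]

lemma drop_runLen (cs : List Char) (i : Nat) :
    cs.drop (i + runLen cs i) = (cs.drop i).dropWhile (· == cs.getD i ' ') := by
  rw [← List.drop_drop]
  conv_lhs => rw [show cs.drop i =
    (cs.drop i).takeWhile (· == cs.getD i ' ') ++ (cs.drop i).dropWhile (· == cs.getD i ' ')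
    from List.takeWhile_append_dropWhile.symm]
  exact List.drop_left' rfl

lemma getD_runLen_ne (cs : List Char) (i : Nat) (h : i + runLen cs i < cs.length) :
    cs.getD (i + runLen cs i) ' ' ≠ cs.getD i ' ' := by
  have hd := drop_runLen cs i
  have hne : (cs.drop i).dropWhile (· == cs.getD i ' ') ≠ [] := by
    rw [← hd]
    intro hnil
    have hl : (cs.drop (i + runLen cs i)).length = cs.length - (i + runLen cs i) :=
      List.length_drop
    rw [hnil] at hl; simp at hl; omega
  have hhead := List.head_dropWhile_not (· == cs.getD i ' ') hne
  have hcons := drop_cons cs (i + runLen cs i) h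
  rw [hd] at hcons
  intro heq
  have h1 : ((cs.drop i).dropWhile (· == cs.getD i ' ')).head? =
      some (((cs.drop i).dropWhile (· == cs.getD i ' ')).head hne) := List.head?_eq_some_head hne
  have h2 : ((cs.drop i).dropWhile (· == cs.getD i ' ')).head? =
      some (cs.getD (i + runLen cs i) ' ') := by rw [hcons]; rfl
  rw [h1] at h2
  simp only [Option.some.injEq] at h2
  rw [h2, heq] at hhead
  simp at hhead

-- any two sufficient fuels give the loop the same value
lemma ntkLoopF_congr : ∀ (f₁ : Nat), ∀ (f₂ : Nat) (cs : List Char) (i j : Nat) (acc : List Int),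
    2 * (cs.length - j) + (j - i) < f₁ → 2 * (cs.length - j) + (j - i) < f₂ →
    ntkLoopF f₁ cs i j acc = ntkLoopF f₂ cs i j acc := by
  intro f₁
  induction f₁ with
  | zero => intro f₂ cs i j acc h1 _; omega
  | succ f₁ ih =>
    intro f₂ cs i j acc h1 h2
    obtain ⟨f₂', rfl⟩ : ∃ f₂', f₂ = f₂' + 1 := ⟨f₂ - 1, by omega⟩
    simp only [ntkLoopF]
    by_cases hij : i ≤ j
    · rw [if_pos hij, if_pos hij]
      by_cases hsc : j < cs.length ∧ cs.getD i ' ' = cs.getD j ' '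
      · rw [if_pos hsc, if_pos hsc]
        exact ih f₂' cs i (j + 1) acc (by omega) (by omega)
      · have hlt : j < cs.length → i < j := by
          intro hj
          rcases Nat.lt_or_ge i j with h | h
          · exact h
          · exact absurd ⟨hj, congrArg (fun m => cs.getD m ' ') (by omega : i = j)⟩ hsc
        rw [if_neg hsc, if_neg hsc]
        by_cases h56 : cs.getD i ' ' = '5' ∨ cs.getD i ' ' = '6'
        · rw [if_pos h56, if_pos h56]
          by_cases hend : cs.length ≤ j
          · rw [if_pos hend, if_pos hend]
          · rw [if_neg hend, if_neg hend]
            have := hlt (by omega)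
            exact ih f₂' cs j j _ (by omega) (by omega)
        · rw [if_neg h56, if_neg h56]
          by_cases hend : cs.length ≤ j
          · rw [if_pos hend, if_pos hend]
          · rw [if_neg hend, if_neg hend]
            have := hlt (by omega)
            exact ih f₂' cs j j _ (by omega) (by omega)
    · rw [if_neg hij, if_neg hij]

-- any two sufficient fuels give the encoder the same value
lemma ntkEncodeF_congr : ∀ (f₁ : Nat), ∀ (f₂ : Nat) (cs : List Char),
    cs.length ≤ f₁ → cs.length ≤ f₂ → ntkEncodeF f₁ cs = ntkEncodeF f₂ cs := by
  intro f₁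
  induction f₁ with
  | zero =>
    intro f₂ cs h1 _
    have : cs = [] := List.eq_nil_of_length_eq_zero (by omega)
    subst this
    cases f₂ <;> rfl
  | succ f₁ ih =>
    intro f₂ cs h1 h2
    cases cs with
    | nil => cases f₂ <;> rfl
    | cons d t =>
      have hc : (d :: t).length = t.length + 1 := by simp
      obtain ⟨f₂', rfl⟩ : ∃ f₂', f₂ = f₂' + 1 := ⟨f₂ - 1, by omega⟩
      simp only [ntkEncodeF]
      congr 1
      have hdw : ((d :: t).dropWhile (· == d)).length ≤ t.length := by
        rw [List.dropWhile_cons_of_pos (by simp)]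
        exact List.length_dropWhile_le (· == d) t
      have hrun1 : 1 ≤ (d :: t).length - ((d :: t).dropWhile (· == d)).length := by
        simp only [List.length_cons]; omega
      have hlen : (((d :: t).drop ((d :: t).length - ((d :: t).dropWhile (· == d)).length)).length)
          ≤ t.length := by
        have : ((d :: t).drop ((d :: t).length - ((d :: t).dropWhile (· == d)).length)).length
            = (d :: t).length - ((d :: t).length - ((d :: t).dropWhile (· == d)).length) :=
          List.length_drop
        simp only [List.length_cons] at this ⊢
        omega
      exact ih f₂' _ (by omega) (by omega)

-- the scanning phase: from any j inside the run, the loop advances j to the end of the run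
lemma ntkLoopF_scan (cs : List Char) (i : Nat) :
    ∀ (k f j : Nat) (acc : List Int), i ≤ j → i + runLen cs i = j + k → j + k ≤ cs.length →
      2 * (cs.length - j) + (j - i) < f →
      ntkLoopF f cs i j acc = ntkLoopF f cs i (i + runLen cs i) acc := by
  intro k
  induction k with
  | zero =>
    intro f j acc _ hk _ _
    have h0 : i + runLen cs i = j := by omega
    rw [h0]
  | succ k ih =>
    intro f j acc hij hk hlen hf
    obtain ⟨f', rfl⟩ : ∃ f', f = f' + 1 := ⟨f - 1, by omega⟩
    have hjlt : j < cs.length := by omega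
    have hrun : j - i < runLen cs i := by omega
    have hgd : cs.getD j ' ' = cs.getD i ' ' := by
      have := getD_of_lt_runLen cs i (j - i) hrun
      rwa [Nat.add_sub_cancel' hij] at this
    conv_lhs => rw [ntkLoopF]
    rw [if_pos hij, if_pos ⟨hjlt, hgd.symm⟩]
    rw [ih f' (j + 1) acc (by omega) (by omega) (by omega) (by omega)]
    exact ntkLoopF_congr f' (f' + 1) cs i (i + runLen cs i) acc (by omega) (by omega)

-- main loop invariant
lemma ntkLoopF_eq_encode (N : Nat) :
    ∀ (cs : List Char) (i f : Nat) (acc : List Int),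
      cs.length - i ≤ N → i < cs.length → 2 * (cs.length - i) < f →
      ntkLoopF f cs i i acc = acc ++ ntkEncode (cs.drop i) := by
  induction N with
  | zero => intro cs i f acc hN hi _; omega
  | succ N ih =>
    intro cs i f acc hN hi hf
    have hT1 := runLen_pos cs i hi
    have hTle := runLen_le cs i
    have hld : (cs.drop i).length = cs.length - i := List.length_drop
    -- scan to the end of the run
    rw [ntkLoopF_scan cs i (runLen cs i) f i acc le_rfl rfl (by omega) (by omega)]
    obtain ⟨f', rfl⟩ : ∃ f', f = f' + 1 := ⟨f - 1, by omega⟩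
    -- at j = i + runLen the loop leaves the scanning branch
    have hcond : ¬ (i + runLen cs i < cs.length ∧ cs.getD i ' ' = cs.getD (i + runLen cs i) ' ') := by
      rintro ⟨hlt, heq⟩; exact getD_runLen_ne cs i hlt heq.symm
    have hcons := drop_cons cs i hi
    have hrun_eq : (cs.drop i).length - ((cs.drop i).dropWhile (· == cs.getD i ' ')).length
        = runLen cs i := by
      have hsp := List.takeWhile_append_dropWhile
        (p := (· == cs.getD i ' ')) (l := cs.drop i)
      have hlen := congrArg List.length hsp
      rw [List.length_append] at hlen
      have hTtw : runLen cs i = ((cs.drop i).takeWhile (· == cs.getD i ' ')).length := rfl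
      omega
    have henc : ntkEncode (cs.drop i) =
        (if cs.getD i ' ' = '5' ∨ cs.getD i ' ' = '6' then 0
         else if cs.getD i ' ' = '3' ∨ cs.getD i ' ' = '4'
           then -(runLen cs i : Int) else (runLen cs i : Int)) ::
        ntkEncode (cs.drop (i + runLen cs i)) := by
      unfold ntkEncode
      conv_lhs => rw [hcons]
      rw [show (cs.getD i ' ' :: (cs.drop i).tail).length = (cs.drop i).tail.length + 1 from
        List.length_cons]
      simp only [ntkEncodeF]
      rw [← hcons, hrun_eq, List.drop_drop]
      congr 1
      refine ntkEncodeF_congr _ _ _ ?_ ?_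
      · have hl2 : (cs.drop (i + runLen cs i)).length = cs.length - (i + runLen cs i) :=
          List.length_drop
        have hl3 : (cs.drop i).tail.length = (cs.drop i).length - 1 := List.length_tail
        omega
      · exact le_rfl
    have hstep : (if cs.getD i ' ' = '3' ∨ cs.getD i ' ' = '4'
          then (((i + runLen cs i : Nat) : Int) - (i : Int)) * -1
          else ((i + runLen cs i : Nat) : Int) - (i : Int))
        = (if cs.getD i ' ' = '3' ∨ cs.getD i ' ' = '4'
           then -(runLen cs i : Int) else (runLen cs i : Int)) := by
      split_ifs <;> push_cast <;> ring
    rw [ntkLoopF, if_pos (by omega : i ≤ i + runLen cs i), if_neg hcond, henc]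
    by_cases h56 : cs.getD i ' ' = '5' ∨ cs.getD i ' ' = '6'
    · rw [if_pos h56, if_pos h56]
      by_cases hend : cs.length ≤ i + runLen cs i
      · rw [if_pos hend, List.drop_eq_nil_of_le hend]
        simp [ntkEncode, ntkEncodeF]
      · rw [if_neg hend, ih cs (i + runLen cs i) f' _ (by omega) (by omega) (by omega)]
        simp
    · rw [if_neg h56, if_neg h56]
      simp only []
      rw [hstep]
      by_cases hend : cs.length ≤ i + runLen cs i
      · rw [if_pos hend, List.drop_eq_nil_of_le hend]
        simp [ntkEncode, ntkEncodeF]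
      · rw [if_neg hend, ih cs (i + runLen cs i) f' _ (by omega) (by omega) (by omega)]
        simp

lemma toChars_ne_nil (n : Int) : PySem.Int.toChars n ≠ [] := by
  unfold PySem.Int.toChars
  split
  · simp
  · have := Nat.length_toDigits_pos (b := 10) (n := n.toNat)
    intro h; rw [h] at this; simp at this

-- ===== VERDICT (by name: the statement is the Claim_ definition above) =====
theorem ntk_spec : Claim_equal_ntk := by
  intro n _
  unfold Spec_ntk ntk ntk_alt
  rw [PySem.Int.toList_toStr]
  have hne := toChars_ne_nil n
  have hlen : 0 < (PySem.Int.toChars n).length := List.length_pos_of_ne_nil hne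
  have := ntkLoopF_eq_encode (PySem.Int.toChars n).length (PySem.Int.toChars n) 0
    (2 * (PySem.Int.toChars n).length + 1) [] (by omega) hlen (by omega)
  simpa using this
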